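-- pv_equiv track=rewrite | github.com/ttvmkos/r5r_assets | tools/AudioTableGenerator/audio_table_gnerator.py | _derive_category_from_rui_location
-- ===== SOURCE A (Python) =====
-- def _normalize_rui_location( rui_location: str ) -> str:
--     s = ( rui_location or "" ).strip( ).replace( "\\", "/" )
--     if s != "" and not s.endswith( "/" ):
--         s += "/"
--     return s
--
-- def _derive_category_from_rui_location( rui_location: str ) -> str:
--     s = _normalize_rui_location( rui_location )
--     if s == "":
--         return ""
--     s = s.rstrip( "/" )
--     parts = [ p for p in s.split( "/" ) if p != "" ]
--     if len( parts ) == 0: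
--         return ""
--     return parts[ -1 ]
-- ===== SOURCE B (Python) =====
-- def _derive_category_from_rui_location(rui_location: str) -> str:
--     s = (rui_location or "").strip().replace("\\", "/")
--     i = len(s) - 1
--     while i >= 0 and s[i] == "/":
--         i -= 1
--     out = []
--     while i >= 0 and s[i] != "/":
--         out.append(s[i])
--         i -= 1
--     return "".join(reversed(out))
-- ===== Notes on version B (the rewrite author's own statement) =====
-- stated objective: alternative
-- what changed: Replaces normalize-then-rstrip-then-split-then-filter-then-[-1] with a single backward scan over the stripped string: skip trailing slashes, then collect characters until the previous slash.
import Mathlib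
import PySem

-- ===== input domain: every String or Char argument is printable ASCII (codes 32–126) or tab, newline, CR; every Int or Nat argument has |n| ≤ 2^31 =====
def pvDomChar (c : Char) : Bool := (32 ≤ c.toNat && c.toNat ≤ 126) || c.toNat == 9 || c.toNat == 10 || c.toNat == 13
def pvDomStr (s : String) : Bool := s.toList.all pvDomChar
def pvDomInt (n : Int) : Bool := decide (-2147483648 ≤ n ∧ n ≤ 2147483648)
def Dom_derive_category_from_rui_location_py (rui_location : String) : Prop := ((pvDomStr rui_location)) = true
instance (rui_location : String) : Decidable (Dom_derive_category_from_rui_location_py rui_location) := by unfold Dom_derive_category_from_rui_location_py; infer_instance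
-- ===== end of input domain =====

-- B replaces normalize + split + filter + [-1] by a single backward scan over the characters (alternative decomposition, same cost).

-- ===== PORT A =====
-- Python rstrip("/"): drop trailing '/' characters (hand port, exact: no PySem primitive strips a char set on one side only)
def pyRstripSlash (cs : List Char) : List Char := (cs.reverse.dropWhile (· == '/')).reverse

-- port of _normalize_rui_location ('rui_location or ""' is the identity on str inputs)
def normalize_rui_location_py (rui_location : String) : List Char :=
  let s := PySem.Chars.replace (PySem.Chars.strip rui_location.toList) ['\\'] ['/']
  if s ≠ [] ∧ PySem.Chars.endswith s ['/'] = false then s ++ ['/'] else s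

def derive_category_from_rui_location_py (rui_location : String) : String :=
  let s := normalize_rui_location_py rui_location
  if s = [] then ""
  else
    let s := pyRstripSlash s
    let parts := (PySem.Chars.splitOn s ['/']).filter (· ≠ [])
    if parts.length = 0 then ""
    else String.ofList ((PySem.List.pyGet? parts (-1)).getD [])

-- ===== PORT B =====
def derive_category_from_rui_location_py_alt (rui_location : String) : String :=
  let r := (PySem.Chars.replace (PySem.Chars.strip rui_location.toList) ['\\'] ['/']).reverse
  -- while i >= 0 and s[i] == "/": i -= 1   (skip trailing slashes, scanning from the end)
  let r := r.dropWhile (· == '/')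
  -- while i >= 0 and s[i] != "/": out.append(s[i]); i -= 1   (collect the last segment, reversed)
  String.ofList ((r.takeWhile (· != '/')).reverse)

-- ===== PRECONDITION & SPEC =====
def Spec_derive_category_from_rui_location_py (rui_location : String) (out : String) : Prop := out = derive_category_from_rui_location_py_alt rui_location
instance (rui_location : String) (out : String) : Decidable (Spec_derive_category_from_rui_location_py rui_location out) := by unfold Spec_derive_category_from_rui_location_py; infer_instance

-- ===== CLAIM (what is proved, stated in full; the proofs are below) =====
def Claim_equal_derive_category_from_rui_location_py : Prop := ∀ (rui_location : String), Dom_derive_category_from_rui_location_py rui_location → Spec_derive_category_from_rui_location_py rui_location (derive_category_from_rui_location_py rui_location)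

-- ===== LEMMAS AND PROOFS =====

-- a simple fuel-free reformulation of PySem.Chars.splitOn.go for the separator "/"
def splitAux : List Char → List Char → List (List Char)
  | [], cur => [cur.reverse]
  | c :: rest, cur => if c == '/' then cur.reverse :: splitAux rest [] else splitAux rest (c :: cur)

lemma splitOn_go_eq (fuel : Nat) (l cur : List Char) (acc : List (List Char))
    (h : l.length < fuel) :
    PySem.Chars.splitOn.go ['/'] fuel l cur acc = acc.reverse ++ splitAux l cur := by
  induction fuel generalizing l cur acc with
  | zero => omega
  | succ n ih =>
    cases l with
    | nil => simp [PySem.Chars.splitOn.go, splitAux]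
    | cons c rest =>
      simp only [PySem.Chars.splitOn.go, splitAux]
      by_cases hc : c = '/'
      · subst hc
        rw [if_pos (by simp [List.isPrefixOf])]
        rw [show List.drop ['/'].length ('/' :: rest) = rest from rfl]
        rw [ih rest [] _ (by simpa using Nat.lt_of_succ_lt_succ h)]
        simp
      · rw [if_neg (by simp [List.isPrefixOf]; exact fun h => hc h.symm)]
        rw [ih rest (c :: cur) acc (by simpa using Nat.lt_of_succ_lt_succ h)]
        simp [hc]

lemma splitOn_eq_splitAux (l : List Char) :
    PySem.Chars.splitOn l ['/'] = splitAux l [] := by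
  unfold PySem.Chars.splitOn
  rw [splitOn_go_eq _ _ _ _ (by omega)]
  simp

lemma splitAux_ne_nil (l cur : List Char) : splitAux l cur ≠ [] := by
  induction l generalizing cur with
  | nil => simp [splitAux]
  | cons c rest ih =>
    simp only [splitAux]
    split <;> simp [ih]

lemma getLast?_cons_ne_nil {α : Type} (a : α) (l : List α) (h : l ≠ []) :
    (a :: l).getLast? = l.getLast? := by
  cases l with
  | nil => exact absurd rfl h
  | cons b m => exact List.getLast?_cons_cons

lemma tw_concat_mem (u : List Char) (h : '/' ∈ u) (c : Char) :
    ((u ++ [c]).takeWhile (· != '/')) = u.takeWhile (· != '/') := by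
  rw [List.takeWhile_append, if_neg]
  intro hlen
  have heq : u.takeWhile (· != '/') = u :=
    (List.takeWhile_prefix _).eq_of_length hlen
  have := List.takeWhile_eq_self_iff.mp heq '/' h
  simp at this

lemma tw_concat_all (u : List Char) (h : ∀ x ∈ u, x ≠ '/') :
    ((u ++ ['/']).takeWhile (· != '/')) = u := by
  have heq : u.takeWhile (· != '/') = u :=
    List.takeWhile_eq_self_iff.mpr (fun x hx => by simpa using h x hx)
  rw [List.takeWhile_append, if_pos (by rw [heq])]
  simp

lemma splitAux_getLast? (l cur : List Char) :
    (splitAux l cur).getLast? =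
      some (if '/' ∈ l then (l.reverse.takeWhile (· != '/')).reverse else cur.reverse ++ l) := by
  induction l generalizing cur with
  | nil => simp [splitAux]
  | cons c rest ih =>
    simp only [splitAux]
    by_cases hc : c = '/'
    · subst hc
      rw [if_pos (by decide), getLast?_cons_ne_nil _ _ (splitAux_ne_nil rest []), ih,
          if_pos (List.mem_cons_self), List.reverse_cons]
      by_cases hr : '/' ∈ rest
      · rw [if_pos hr, tw_concat_mem _ (by simpa using hr)]
      · rw [if_neg hr, tw_concat_all _ (fun x hx => by
          intro hx'; exact hr (by simpa [hx'] using (List.mem_reverse.mp hx)))]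
        simp
    · rw [if_neg (by simp [hc]), ih]
      have hmem : ('/' ∈ c :: rest) = ('/' ∈ rest) := by
        simp [List.mem_cons, Ne.symm hc]
      by_cases hr : '/' ∈ rest
      · rw [if_pos hr, if_pos (by simp [hr]), List.reverse_cons, tw_concat_mem _ (by simpa using hr)]
      · rw [if_neg hr, if_neg (by simp [hr, Ne.symm hc])]
        simp

lemma filter_getLast?_of_ne_nil (L : List (List Char)) (x : List Char) (hx : x ≠ [])
    (h : L.getLast? = some x) : (L.filter (· ≠ [])).getLast? = some x := by
  induction L with
  | nil => simp at h
  | cons a L' ih =>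
    cases L' with
    | nil =>
      simp at h
      subst h
      simp [List.filter, hx]
    | cons b M =>
      rw [List.getLast?_cons_cons] at h
      have hf := ih h
      have hfe : (List.filter (· ≠ []) (b :: M)) ≠ [] := by
        intro he; rw [he] at hf; simp at hf
      by_cases ha : a = []
      · simpa [List.filter, ha] using hf
      · rw [show List.filter (· ≠ []) (a :: b :: M)
              = a :: List.filter (· ≠ []) (b :: M) by simp [List.filter, ha]]
        rw [getLast?_cons_ne_nil _ _ hfe]
        exact hf

lemma pyGet?_neg_one {α : Type} (L : List α) (h : L ≠ []) :
    PySem.List.pyGet? L (-1) = L.getLast? := by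
  have hlen : 1 ≤ L.length := List.length_pos_iff.mpr h
  simp only [PySem.List.pyGet?, PySem.List.pyIdx?]
  rw [if_neg (by omega), if_pos (by omega)]
  simp [List.getLast?_eq_getElem?]

lemma dropWhile_head_ne (l r' : List Char) (h0 : Char)
    (hr : l.dropWhile (· == '/') = h0 :: r') : (h0 == '/') = false := by
  have := List.head?_dropWhile_not (· == '/') l
  rw [hr] at this
  simpa using this

lemma core_eq (m : List Char) :
    (if ((PySem.Chars.splitOn (pyRstripSlash m) ['/']).filter (· ≠ [])).length = 0 then ""
     else String.ofList
       ((PySem.List.pyGet? ((PySem.Chars.splitOn (pyRstripSlash m) ['/']).filter (· ≠ [])) (-1)).getD []))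
    = String.ofList (((m.reverse.dropWhile (· == '/')).takeWhile (· != '/')).reverse) := by
  set r := m.reverse.dropWhile (· == '/') with hr
  have ht : pyRstripSlash m = r.reverse := rfl
  rw [ht, splitOn_eq_splitAux]
  by_cases hrc : r = []
  · simp [hrc, splitAux, List.filter]
  · obtain ⟨h0, r', hcons⟩ := List.exists_cons_of_ne_nil hrc
    have hhead : (h0 == '/') = false := dropWhile_head_ne m.reverse r' h0 (hr ▸ hcons)
    have hlast : (splitAux r.reverse []).getLast? = some ((r.takeWhile (· != '/')).reverse) := by
      rw [splitAux_getLast?]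
      by_cases hmem : '/' ∈ r.reverse
      · rw [if_pos hmem]
        simp
      · rw [if_neg hmem]
        have : r.takeWhile (· != '/') = r :=
          List.takeWhile_eq_self_iff.mpr (fun x hx => by
            simp only [bne_iff_ne, ne_eq]
            intro hx'
            exact hmem (List.mem_reverse.mpr (hx' ▸ hx)))
        simp [this]
    have hseg : (r.takeWhile (· != '/')).reverse ≠ [] := by
      rw [hcons, List.takeWhile_cons, if_pos (by simpa using hhead)]
      simp
    have hfl := filter_getLast?_of_ne_nil _ _ hseg hlast
    have hfe : ((splitAux r.reverse []).filter (· ≠ [])) ≠ [] := by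
      intro he; rw [he] at hfl; simp at hfl
    rw [if_neg (by simpa [List.length_eq_zero_iff] using hfe)]
    rw [pyGet?_neg_one _ hfe, hfl]
    rfl

-- ===== VERDICT (by name: the statement is the Claim_ definition above) =====
theorem derive_category_from_rui_location_py_spec : Claim_equal_derive_category_from_rui_location_py := by
  intro rui _
  unfold Spec_derive_category_from_rui_location_py
  unfold derive_category_from_rui_location_py derive_category_from_rui_location_py_alt
    normalize_rui_location_py
  dsimp only
  generalize PySem.Chars.replace (PySem.Chars.strip rui.toList) ['\\'] ['/'] = m
  by_cases h0 : m = []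
  · simp [h0]
  · have hrs : pyRstripSlash (if m ≠ [] ∧ PySem.Chars.endswith m ['/'] = false
        then m ++ ['/'] else m) = pyRstripSlash m := by
      split
      · simp [pyRstripSlash]
      · rfl
    have hne : (if m ≠ [] ∧ PySem.Chars.endswith m ['/'] = false
        then m ++ ['/'] else m) ≠ [] := by
      split
      · simp
      · exact h0
    rw [if_neg hne, hrs]
    exact core_eq m
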